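-- pv_equiv track=rewrite | github.com/dersario/test-reports | defs.py | standart_rate_name
-- ===== SOURCE A (Python) =====
-- def standart_rate_name(columns: list[str]) -> list[str]:
--     rate_vars = ["rate", "hourly_rate", "salary"]
--     for var in rate_vars:
--         try:
--             rate_index = columns.index(var)
--             columns[rate_index] = "rate"
--             return columns
--         except ValueError:
--             continue
--     return columns
-- ===== SOURCE B (Python) =====
-- def standart_rate_name(columns: list[str]) -> list[str]:
--     prio = {"rate": 0, "hourly_rate": 1, "salary": 2}
--     best = None
--     for i, c in enumerate(columns):
--         r = prio.get(c)
--         if r is not None and (best is None or (r, i) < best):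
--             best = (r, i)
--     if best is not None:
--         columns[best[1]] = "rate"
--     return columns
-- ===== Notes on version B (the rewrite author's own statement) =====
-- stated objective: alternative
-- what changed: Replaces A's three priority-ordered list.index scans (with try/except) by a single pass over enumerate(columns) that keeps the lexicographically smallest (priority-rank, index) candidate, then renames that one position.
import Mathlib
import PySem

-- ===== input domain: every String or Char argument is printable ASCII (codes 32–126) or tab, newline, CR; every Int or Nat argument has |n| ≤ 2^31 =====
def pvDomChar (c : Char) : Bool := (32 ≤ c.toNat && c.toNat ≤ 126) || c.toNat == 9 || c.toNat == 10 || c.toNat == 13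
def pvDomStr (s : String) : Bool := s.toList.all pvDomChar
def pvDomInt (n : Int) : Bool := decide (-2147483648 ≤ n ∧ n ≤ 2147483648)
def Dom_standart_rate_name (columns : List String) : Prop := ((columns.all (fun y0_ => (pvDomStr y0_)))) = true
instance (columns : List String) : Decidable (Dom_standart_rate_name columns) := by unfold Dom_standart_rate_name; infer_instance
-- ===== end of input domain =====

-- B makes one pass keeping the best (priority-rank, index) pair instead of A's three priority-ordered index scans.
-- Note: the Python A mutates `columns` in place and returns it; the Python B performs the same mutation; the equivalence proved here is about the return value.

-- ===== PORT A =====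
-- for var in ["rate","hourly_rate","salary"]: try columns.index(var); columns[idx] = "rate"; return
def standart_rate_name (columns : List String) : List String :=
  match PySem.List.index? columns "rate" with
  | some i => columns.set i "rate"
  | none =>
    match PySem.List.index? columns "hourly_rate" with
    | some i => columns.set i "rate"
    | none =>
      match PySem.List.index? columns "salary" with
      | some i => columns.set i "rate"
      | none => columns

-- ===== PORT B =====
-- prio.get(c) on the literal dict {"rate":0,"hourly_rate":1,"salary":2}
def srnRank (c : String) : Option Int :=
  if c = "rate" then some 0
  else if c = "hourly_rate" then some 1
  else if c = "salary" then some 2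
  else none

-- loop body: keep the new (r, i) iff a rank was found and (best is None or (r, i) < best)
-- (Python's tuple '<' is lexicographic; written out componentwise, exact)
def srnStep (b : Option (Int × Int)) (p : Int × String) : Option (Int × Int) :=
  match srnRank p.2 with
  | none => b
  | some r =>
    match b with
    | none => some (r, p.1)
    | some bb => if r < bb.1 ∨ (r = bb.1 ∧ p.1 < bb.2) then some (r, p.1) else b

def standart_rate_name_alt (columns : List String) : List String :=
  match (PySem.List.enumerate columns 0).foldl srnStep none with
  | some bb => PySem.List.pySetD columns bb.2 "rate"
  | none => columns

-- ===== PRECONDITION & SPEC =====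
def Spec_standart_rate_name (columns : List String) (out : List String) : Prop := out = standart_rate_name_alt columns
instance (columns : List String) (out : List String) : Decidable (Spec_standart_rate_name columns out) := by unfold Spec_standart_rate_name; infer_instance

-- ===== CLAIM (what is proved, stated in full; the proofs are below) =====
def Claim_equal_standart_rate_name : Prop := ∀ (columns : List String), Dom_standart_rate_name columns → Spec_standart_rate_name columns (standart_rate_name columns)

-- ===== LEMMAS AND PROOFS =====

-- recursive description of the loop's running best (same tie rule: earlier candidate wins)
def srnBest? : List String → Int → Option (Int × Int)
  | [], _ => none
  | c :: cs, i =>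
    match srnRank c, srnBest? cs (i + 1) with
    | none, rest => rest
    | some r, none => some (r, i)
    | some r, some y => if r < y.1 ∨ (r = y.1 ∧ i < y.2) then some (r, i) else some y

def srnMerge (b : Option (Int × Int)) : Option (Int × Int) → Option (Int × Int)
  | none => b
  | some y =>
    match b with
    | none => some y
    | some bb => if y.1 < bb.1 ∨ (y.1 = bb.1 ∧ y.2 < bb.2) then some y else some bb

theorem srnRank_nonneg (c : String) (r : Int) (h : srnRank c = some r) : 0 ≤ r := by
  simp only [srnRank] at h; split_ifs at h <;> simp_all <;> omega

theorem srnRank_ge1 (c : String) (r : Int) (hc : c ≠ "rate") (h : srnRank c = some r) : 1 ≤ r := by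
  simp only [srnRank] at h; split_ifs at h <;> simp_all <;> omega

theorem srnRank_ge2 (c : String) (r : Int) (hc : c ≠ "rate") (hc2 : c ≠ "hourly_rate")
    (h : srnRank c = some r) : 2 ≤ r := by
  simp only [srnRank] at h; split_ifs at h <;> simp_all <;> omega

theorem srnRank_none (c : String) (hc : c ≠ "rate") (hc2 : c ≠ "hourly_rate")
    (hc3 : c ≠ "salary") : srnRank c = none := by
  simp only [srnRank]
  rw [if_neg hc, if_neg hc2, if_neg hc3]

theorem srnFoldl_eq (l : List String) : ∀ (i : Int) (b : Option (Int × Int)),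
    (PySem.List.enumerate l i).foldl srnStep b = srnMerge b (srnBest? l i) := by
  induction l with
  | nil => intro i b; simp [PySem.List.enumerate_nil, srnBest?, srnMerge]
  | cons c cs ih =>
    intro i b
    rw [PySem.List.enumerate_cons, List.foldl_cons, ih]
    cases hr : srnRank c with
    | none => simp only [srnBest?, srnStep, hr]
    | some r =>
      cases hrest : srnBest? cs (i + 1) with
      | none =>
        cases b with
        | none => simp only [srnBest?, srnStep, hr, hrest, srnMerge]
        | some bb =>
          obtain ⟨b1, b2⟩ := bb
          simp only [srnBest?, srnStep, hr, hrest, srnMerge]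
      | some y =>
        obtain ⟨y1, y2⟩ := y
        cases b with
        | none =>
          simp only [srnBest?, srnStep, hr, hrest, srnMerge]
          split_ifs <;> dsimp only [srnMerge] <;> (try split_ifs) <;>
            first | rfl | (simp only [Option.some.injEq, Prod.mk.injEq]; omega) | (exfalso; omega)
        | some bb =>
          obtain ⟨b1, b2⟩ := bb
          simp only [srnBest?, srnStep, hr, hrest, srnMerge]
          split_ifs <;> dsimp only [srnMerge] <;> (try split_ifs) <;>
            first | rfl | (simp only [Option.some.injEq, Prod.mk.injEq]; omega) | (exfalso; omega)

theorem srnBest?_idx_ge (l : List String) : ∀ (i : Int) (y : Int × Int),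
    srnBest? l i = some y → i ≤ y.2 := by
  induction l with
  | nil => intro i y h; simp [srnBest?] at h
  | cons c cs ih =>
    intro i y h
    cases hr : srnRank c with
    | none =>
      simp only [srnBest?, hr] at h
      have := ih (i + 1) y h; omega
    | some r =>
      cases hrest : srnBest? cs (i + 1) with
      | none => simp only [srnBest?, hr, hrest] at h; cases h; omega
      | some z =>
        simp only [srnBest?, hr, hrest] at h
        have hz := ih (i + 1) z hrest
        split_ifs at h <;> cases h <;> omega

-- lower bound on the best rank from a lower bound on every rank present
theorem srnBest?_rank_lb (t : Int) (l : List String)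
    (hall : ∀ d ∈ l, ∀ r : Int, srnRank d = some r → t ≤ r) :
    ∀ (i : Int) (y : Int × Int), srnBest? l i = some y → t ≤ y.1 := by
  induction l with
  | nil => intro i y h; simp [srnBest?] at h
  | cons c cs ih =>
    intro i y h
    have hall' : ∀ d ∈ cs, ∀ r : Int, srnRank d = some r → t ≤ r :=
      fun d hd => hall d (List.mem_cons_of_mem _ hd)
    cases hr : srnRank c with
    | none => simp only [srnBest?, hr] at h; exact ih hall' (i + 1) y h
    | some r =>
      have hrt : t ≤ r := hall c List.mem_cons_self r hr
      cases hrest : srnBest? cs (i + 1) with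
      | none => simp only [srnBest?, hr, hrest] at h; cases h; exact hrt
      | some z =>
        simp only [srnBest?, hr, hrest] at h
        have hz := ih hall' (i + 1) z hrest
        split_ifs at h <;> cases h <;> simp_all

def srnRankOf (v : String) : Int :=
  if v = "rate" then 0 else if v = "hourly_rate" then 1 else 2

-- If v is the highest-priority rate variable present and k is its first index,
-- the running best is exactly (rank v, i + k).
theorem srnBest?_char (l : List String) : ∀ (i : Int) (v : String) (k : Nat),
    (v = "rate" ∨ v = "hourly_rate" ∨ v = "salary") →
    (v = "hourly_rate" → "rate" ∉ l) →
    (v = "salary" → "rate" ∉ l ∧ "hourly_rate" ∉ l) →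
    PySem.List.index? l v = some k →
    srnBest? l i = some (srnRankOf v, i + k) := by
  induction l with
  | nil => intro i v k _ _ _ hidx; simp [PySem.List.index?_eq_idxOf?] at hidx
  | cons c cs ih =>
    intro i v k hv h1 h2 hidx
    by_cases hc : c = v
    · subst hc
      rw [PySem.List.index?_cons_self] at hidx
      cases hidx
      have hrk : srnRank c = some (srnRankOf c) := by
        rcases hv with h | h | h <;> simp [h, srnRank, srnRankOf]
      cases hrest : srnBest? cs (i + 1) with
      | none => simp [srnBest?, hrk, hrest]
      | some y =>
        simp only [srnBest?, hrk, hrest]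
        have hy2 : i + 1 ≤ y.2 := srnBest?_idx_ge cs (i + 1) y hrest
        have hylb : srnRankOf c ≤ y.1 := by
          rcases hv with h | h | h <;> subst h
          · refine le_trans (by simp [srnRankOf]) (srnBest?_rank_lb 0 cs ?_ (i + 1) y hrest)
            exact fun d _ r hr => srnRank_nonneg d r hr
          · refine le_trans (by simp [srnRankOf]) (srnBest?_rank_lb 1 cs ?_ (i + 1) y hrest)
            intro d hd r hr
            exact srnRank_ge1 d r (fun he => (h1 rfl) (he ▸ List.mem_cons_of_mem _ hd)) hr
          · refine le_trans (by simp [srnRankOf]) (srnBest?_rank_lb 2 cs ?_ (i + 1) y hrest)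
            intro d hd r hr
            refine srnRank_ge2 d r ?_ ?_ hr
            · exact fun he => ((h2 rfl).1) (he ▸ List.mem_cons_of_mem _ hd)
            · exact fun he => ((h2 rfl).2) (he ▸ List.mem_cons_of_mem _ hd)
        have hcond : srnRankOf c < y.1 ∨ (srnRankOf c = y.1 ∧ i < y.2) := by omega
        rw [if_pos hcond]
        simp
    · rw [PySem.List.index?_cons_of_ne cs hc] at hidx
      cases hk : PySem.List.index? cs v with
      | none => rw [hk] at hidx; simp at hidx
      | some k' =>
        rw [hk] at hidx
        simp only [Option.map_some] at hidx
        cases hidx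
        have h1' : v = "hourly_rate" → "rate" ∉ cs := fun h hm => (h1 h) (List.mem_cons_of_mem _ hm)
        have h2' : v = "salary" → "rate" ∉ cs ∧ "hourly_rate" ∉ cs :=
          fun h => ⟨fun hm => ((h2 h).1) (List.mem_cons_of_mem _ hm),
                    fun hm => ((h2 h).2) (List.mem_cons_of_mem _ hm)⟩
        have hrest := ih (i + 1) v k' hv h1' h2' hk
        cases hr : srnRank c with
        | none =>
          simp only [srnBest?, hr, hrest]
          simp only [Option.some.injEq, Prod.mk.injEq, true_and]
          push_cast
          omega
        | some r =>
          simp only [srnBest?, hr, hrest]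
          have hy2 : i + 1 ≤ i + 1 + (k' : Int) := by omega
          have hlose : ¬ (r < srnRankOf v ∨ (r = srnRankOf v ∧ i < i + 1 + (k' : Int))) := by
            rcases hv with h | h | h <;> subst h
            · have := srnRank_ge1 c r (fun he => hc he) hr
              rw [show srnRankOf "rate" = 0 from by decide]; omega
            · have hnr : c ≠ "rate" := fun hcr => (h1 rfl) (hcr ▸ List.mem_cons_self)
              have := srnRank_ge2 c r hnr hc hr
              rw [show srnRankOf "hourly_rate" = 1 from by decide]; omega
            · have hnr : c ≠ "rate" := fun hcr => ((h2 rfl).1) (hcr ▸ List.mem_cons_self)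
              have hnh : c ≠ "hourly_rate" := fun hcr => ((h2 rfl).2) (hcr ▸ List.mem_cons_self)
              rw [srnRank_none c hnr hnh hc] at hr
              exact absurd hr (by simp)
          rw [if_neg hlose]
          simp only [Option.some.injEq, Prod.mk.injEq, true_and]
          push_cast
          omega

theorem srnBest?_none (l : List String) (i : Int)
    (h0 : "rate" ∉ l) (h1 : "hourly_rate" ∉ l) (h2 : "salary" ∉ l) :
    srnBest? l i = none := by
  induction l generalizing i with
  | nil => simp [srnBest?]
  | cons c cs ih =>
    simp only [List.mem_cons, not_or] at h0 h1 h2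
    have hr : srnRank c = none :=
      srnRank_none c (fun h => h0.1 h.symm) (fun h => h1.1 h.symm) (fun h => h2.1 h.symm)
    simp only [srnBest?, hr, ih (i + 1) h0.2 h1.2 h2.2]

-- ===== VERDICT (by name: the statement is the Claim_ definition above) =====
theorem standart_rate_name_spec : Claim_equal_standart_rate_name := by
  intro columns _
  unfold Spec_standart_rate_name standart_rate_name standart_rate_name_alt
  rw [srnFoldl_eq]
  cases h0 : PySem.List.index? columns "rate" with
  | some k =>
    rw [srnBest?_char columns 0 "rate" k (by simp) (by simp) (by simp) h0]
    simp [srnMerge, zero_add]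
  | none =>
    cases h1 : PySem.List.index? columns "hourly_rate" with
    | some k =>
      rw [srnBest?_char columns 0 "hourly_rate" k (by simp)
        (fun _ => (PySem.List.index?_eq_none_iff _ _).mp h0) (by simp) h1]
      simp [srnMerge, zero_add]
    | none =>
      cases h2 : PySem.List.index? columns "salary" with
      | some k =>
        rw [srnBest?_char columns 0 "salary" k (by simp) (by simp)
          (fun _ => ⟨(PySem.List.index?_eq_none_iff _ _).mp h0,
                     (PySem.List.index?_eq_none_iff _ _).mp h1⟩) h2]
        simp [srnMerge, zero_add]
      | none =>
        rw [srnBest?_none columns 0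
          ((PySem.List.index?_eq_none_iff _ _).mp h0)
          ((PySem.List.index?_eq_none_iff _ _).mp h1)
          ((PySem.List.index?_eq_none_iff _ _).mp h2)]
        rfl
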